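-- pv_equiv track=rewrite | github.com/min-hacker/pythonProject2-master | pythonProject2-master/환승기능구현4.py | find_common_stations
-- ===== SOURCE A (Python) =====
-- def find_common_stations(departure_routes, destination_routes):
--     common_stations = []
--
--     for departure_route in departure_routes:
--         for departure_station, _, _, _ in departure_route[1]:
--             for destination_route in destination_routes:
--                 for destination_station, _, _, _ in destination_route[1]:
--                     if departure_station == destination_station:
--                         common_stations.append((departure_station, departure_route[0], destination_route[0]))
--
--     return common_stations
-- ===== SOURCE B (Python) =====
-- def find_common_stations(departure_routes, destination_routes):
--     # Index: station name -> list of destination route ids (one per occurrence, in order)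
--     index = {}
--     for dest_id, dest_stations in destination_routes:
--         for station, _, _, _ in dest_stations:
--             index.setdefault(station, []).append(dest_id)
--     common_stations = []
--     for dep_id, dep_stations in departure_routes:
--         for station, _, _, _ in dep_stations:
--             for dest_id in index.get(station, ()):
--                 common_stations.append((station, dep_id, dest_id))
--     return common_stations
-- ===== Notes on version B (the rewrite author's own statement) =====
-- stated objective: alternative
-- what changed: Replaces the quadruple nested scan (every departure station against every destination station) by a one-pass dict index from station name to destination route ids, then a single lookup per departure station; on match-heavy inputs the output size dominates so the measured cost is similar.
import Mathlib
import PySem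

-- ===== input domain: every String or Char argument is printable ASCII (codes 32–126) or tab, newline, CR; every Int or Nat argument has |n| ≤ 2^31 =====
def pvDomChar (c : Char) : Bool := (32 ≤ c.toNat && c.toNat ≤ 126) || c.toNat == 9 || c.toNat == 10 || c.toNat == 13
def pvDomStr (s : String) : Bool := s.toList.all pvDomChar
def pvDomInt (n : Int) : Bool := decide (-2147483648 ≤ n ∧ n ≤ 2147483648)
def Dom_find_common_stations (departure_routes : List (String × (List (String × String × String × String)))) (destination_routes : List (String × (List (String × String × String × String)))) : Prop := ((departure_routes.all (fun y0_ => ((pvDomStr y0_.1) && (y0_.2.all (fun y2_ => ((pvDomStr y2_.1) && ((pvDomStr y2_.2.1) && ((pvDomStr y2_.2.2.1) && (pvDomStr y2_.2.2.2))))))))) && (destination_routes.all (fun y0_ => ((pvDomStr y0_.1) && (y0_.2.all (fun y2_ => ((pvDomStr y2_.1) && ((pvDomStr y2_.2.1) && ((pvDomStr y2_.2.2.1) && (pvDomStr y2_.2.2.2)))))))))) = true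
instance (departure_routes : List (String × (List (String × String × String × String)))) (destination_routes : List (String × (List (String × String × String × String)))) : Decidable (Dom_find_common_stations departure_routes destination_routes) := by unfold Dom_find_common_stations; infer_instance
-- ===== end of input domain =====

-- B replaces A's quadruple nested scan by a dict index (station → destination route ids) built
-- once and looked up per departure station (objective: alternative algorithm; measured speed similar).

-- ===== PORT A =====
-- literal transliteration of A's four nested loops accumulating common_stations
def find_common_stations (departure_routes : List (String × (List (String × String × String × String)))) (destination_routes : List (String × (List (String × String × String × String)))) : List (String × String × String) :=
  departure_routes.foldl (fun acc departure_route =>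
    departure_route.2.foldl (fun acc s =>
      destination_routes.foldl (fun acc destination_route =>
        destination_route.2.foldl (fun acc t =>
          if s.1 == t.1 then acc ++ [(s.1, departure_route.1, destination_route.1)] else acc)
          acc)
        acc)
      acc)
    []

-- ===== PORT B =====
-- index.setdefault(station, []).append(dest_id) loop from Source B
def fcsIndex (destination_routes : List (String × (List (String × String × String × String)))) : PySem.Dict String (List String) :=
  destination_routes.foldl (fun d r =>
    r.2.foldl (fun d s => d.modify s.1 [] (· ++ [r.1])) d)
    PySem.Dict.empty

def find_common_stations_alt (departure_routes : List (String × (List (String × String × String × String)))) (destination_routes : List (String × (List (String × String × String × String)))) : List (String × String × String) :=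
  let index := fcsIndex destination_routes
  departure_routes.foldl (fun acc r =>
    r.2.foldl (fun acc s =>
      (index.getD s.1 []).foldl (fun acc dest_id => acc ++ [(s.1, r.1, dest_id)]) acc)
      acc)
    []

-- ===== PRECONDITION & SPEC =====
def Spec_find_common_stations (departure_routes : List (String × (List (String × String × String × String)))) (destination_routes : List (String × (List (String × String × String × String)))) (out : List (String × String × String)) : Prop := out = find_common_stations_alt departure_routes destination_routes
instance (departure_routes : List (String × (List (String × String × String × String)))) (destination_routes : List (String × (List (String × String × String × String)))) (out : List (String × String × String)) : Decidable (Spec_find_common_stations departure_routes destination_routes out) := by unfold Spec_find_common_stations; infer_instance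

-- ===== CLAIM (what is proved, stated in full; the proofs are below) =====
def Claim_equal_find_common_stations : Prop := ∀ (departure_routes : List (String × (List (String × String × String × String)))) (destination_routes : List (String × (List (String × String × String × String)))), Dom_find_common_stations departure_routes destination_routes → Spec_find_common_stations departure_routes destination_routes (find_common_stations departure_routes destination_routes)

-- ===== LEMMAS AND PROOFS =====

-- the index specification: route ids of all occurrences of station st among the destination routes
def fcsSpec (destination_routes : List (String × (List (String × String × String × String)))) (st : String) : List String :=
  destination_routes.flatMap (fun tr => tr.2.filterMap (fun t => if st == t.1 then some tr.1 else none))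

theorem fcs_inner_modify (stations : List (String × String × String × String)) (rid st : String)
    (d : PySem.Dict String (List String)) :
    (stations.foldl (fun d s => d.modify s.1 [] (· ++ [rid])) d).getD st []
      = d.getD st [] ++ stations.filterMap (fun t => if st == t.1 then some rid else none) := by
  induction stations generalizing d with
  | nil => simp
  | cons h tl ih =>
    simp only [List.foldl_cons, List.filterMap_cons, ih]
    rw [PySem.Dict.getD_modify]
    by_cases hst : st = h.1 <;> simp [hst, beq_iff_eq]

theorem fcsIndex_getD (destination_routes : List (String × (List (String × String × String × String)))) (st : String) :
    (fcsIndex destination_routes).getD st [] = fcsSpec destination_routes st := by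
  unfold fcsIndex fcsSpec
  have gen : ∀ (l : List (String × (List (String × String × String × String)))) (d : PySem.Dict String (List String)),
      (l.foldl (fun d r => r.2.foldl (fun d s => d.modify s.1 [] (· ++ [r.1])) d) d).getD st []
        = d.getD st [] ++ l.flatMap (fun tr => tr.2.filterMap (fun t => if st == t.1 then some tr.1 else none)) := by
    intro l
    induction l with
    | nil => simp
    | cons h tl ih =>
      intro d
      simp only [List.foldl_cons, List.flatMap_cons, ih, fcs_inner_modify, List.append_assoc]
  simpa using gen destination_routes PySem.Dict.empty

theorem fcs_A_innermost (st rid hid : String) (l : List (String × String × String × String))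
    (acc : List (String × String × String)) :
    l.foldl (fun acc t => if st == t.1 then acc ++ [(st, rid, hid)] else acc) acc
      = acc ++ (l.filterMap (fun t => if st == t.1 then some hid else none)).map (fun did => (st, rid, did)) := by
  induction l generalizing acc with
  | nil => simp
  | cons x xs ihl =>
    rw [List.foldl_cons, List.filterMap_cons]
    by_cases hx : (st == x.1) = true
    · rw [if_pos hx, if_pos hx, ihl]; simp
    · rw [if_neg hx, if_neg hx, ihl]

theorem fcs_A_inner (destination_routes : List (String × (List (String × String × String × String))))
    (st rid : String) (acc : List (String × String × String)) :
    destination_routes.foldl (fun acc tr =>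
        tr.2.foldl (fun acc t => if st == t.1 then acc ++ [(st, rid, tr.1)] else acc) acc) acc
      = acc ++ (fcsSpec destination_routes st).map (fun did => (st, rid, did)) := by
  unfold fcsSpec
  induction destination_routes generalizing acc with
  | nil => simp
  | cons h tl ih =>
    rw [List.foldl_cons, fcs_A_innermost, ih]
    simp [List.flatMap_cons]

theorem fcs_B_inner (idx : List String) (st rid : String) (acc : List (String × String × String)) :
    idx.foldl (fun acc dest_id => acc ++ [(st, rid, dest_id)]) acc
      = acc ++ idx.map (fun did => (st, rid, did)) := by
  induction idx generalizing acc with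
  | nil => simp
  | cons h tl ih => simp [ih]

-- ===== VERDICT (by name: the statement is the Claim_ definition above) =====
theorem find_common_stations_spec : Claim_equal_find_common_stations := by
  intro departure_routes destination_routes _
  unfold Spec_find_common_stations
  simp only [find_common_stations, find_common_stations_alt, fcsIndex_getD]
  congr 1
  funext acc r
  congr 1
  funext acc s
  rw [fcs_A_inner, fcs_B_inner]
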